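-- pv_equiv track=rewrite | github.com/thealper2/codewars-solutions | 7-kyu/sum_the_repeats.py | repeat_sum
-- ===== SOURCE A (Python) =====
-- from collections import defaultdict
--
-- def repeat_sum(l):
--     freq = defaultdict(int)
--     for arr in l:
--         seen = set(arr)
--         for num in seen:
--             freq[num] += 1
--
--     total = 0
--     for k, v in freq.items():
--         if v >= 2:
--             total += k
--
--     return total
-- ===== SOURCE B (Python) =====
-- def repeat_sum(l):
--     # flatten the per-sublist deduped elements, then repeatedly strip the head
--     # value out of the worklist, tallying it when it occurred in >= 2 sublists
--     flat = [x for arr in l for x in set(arr)]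
--     total = 0
--     while flat:
--         head = flat[0]
--         rest = [x for x in flat if x != head]
--         if len(flat) - len(rest) >= 2:
--             total += head
--         flat = rest
--     return total
-- ===== Notes on version B (the rewrite author's own statement) =====
-- stated objective: alternative
-- what changed: Replaces the per-sublist frequency dict and the final v>=2 filtering pass with a flatten-then-repeated-partition algorithm: the deduped sublists are flattened into one worklist, and the loop repeatedly strips every copy of the head value out of the worklist, adding the head when the stripped run has length >= 2.
import Mathlib
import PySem

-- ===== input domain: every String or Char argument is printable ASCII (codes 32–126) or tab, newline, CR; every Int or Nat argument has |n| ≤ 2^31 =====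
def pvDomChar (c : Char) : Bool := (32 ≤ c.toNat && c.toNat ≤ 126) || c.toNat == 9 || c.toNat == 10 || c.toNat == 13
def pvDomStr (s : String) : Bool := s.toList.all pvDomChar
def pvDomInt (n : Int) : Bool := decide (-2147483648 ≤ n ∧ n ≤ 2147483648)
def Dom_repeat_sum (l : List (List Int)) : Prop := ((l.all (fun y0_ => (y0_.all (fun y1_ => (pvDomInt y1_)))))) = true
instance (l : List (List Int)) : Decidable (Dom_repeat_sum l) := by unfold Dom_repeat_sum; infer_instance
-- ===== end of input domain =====

-- B abandons A's per-sublist frequency dict: it flattens the deduped sublists into one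
-- worklist and repeatedly partitions off all copies of the head value, adding the head when
-- its run had length >= 2; objective: alternative (no dict or counts kept, different traversal).

-- ===== PORT A =====
def repeat_sum (l : List (List Int)) : Int :=
  let freq : PySem.Dict Int Int :=
    l.foldl (fun d arr =>
      (PySem.Set.ofList arr).foldl (fun d num => d.modify num 0 (· + 1)) d)
      PySem.Dict.empty
  -- sum over freq.items of k where v >= 2 (order-independent, so dict order is exact)
  freq.items.foldl (fun total kv => if kv.2 ≥ 2 then total + kv.1 else total) 0

-- ===== PORT B =====
-- the while-loop of Source B: strip all copies of the head out of the worklist each round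
def rsLoop : List Int → Int → Int
  | [], total => total
  | head :: tl, total =>
    let rest := (head :: tl).filter (fun y => y ≠ head)
    rsLoop rest
      (if 2 ≤ ((head :: tl).length : Int) - (rest.length : Int) then total + head else total)
termination_by flat _ => flat.length
decreasing_by
  simp only [List.filter_cons, ne_eq, not_true_eq_false, decide_false,
    List.length_cons]
  exact Nat.lt_succ_of_le (List.length_filter_le _ _)

def repeat_sum_alt (l : List (List Int)) : Int :=
  rsLoop (l.flatMap (fun arr => PySem.Set.ofList arr)) 0

-- ===== PRECONDITION & SPEC =====
def Spec_repeat_sum (l : List (List Int)) (out : Int) : Prop := out = repeat_sum_alt l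
instance (l : List (List Int)) (out : Int) : Decidable (Spec_repeat_sum l out) := by unfold Spec_repeat_sum; infer_instance

-- ===== CLAIM (what is proved, stated in full; the proofs are below) =====
def Claim_equal_repeat_sum : Prop := ∀ (l : List (List Int)), Dom_repeat_sum l → Spec_repeat_sum l (repeat_sum l)

-- ===== LEMMAS AND PROOFS =====

-- the common middle form: sum of the distinct values of xs that occur at least twice
def rsSpec (xs : List Int) : Int :=
  ((PySem.Set.ofList xs).filter (fun v => decide (2 ≤ xs.count v))).sum

theorem foldl_if_sum (xs : List (Int × Int)) (t : Int) :
    xs.foldl (fun total kv => if kv.2 ≥ 2 then total + kv.1 else total) t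
      = t + ((xs.filter (fun kv => 2 ≤ kv.2)).map (·.1)).sum := by
  induction xs generalizing t with
  | nil => simp
  | cons kv xs ih =>
      by_cases h : 2 ≤ kv.2
      · simp [List.foldl_cons, h, ih]; ring
      · simp [List.foldl_cons, h, ih]

-- dedup commutes with filter
theorem ofList_filter (p : Int → Bool) (xs : List Int) :
    PySem.Set.ofList (xs.filter p) = (PySem.Set.ofList xs).filter p := by
  induction xs with
  | nil => simp
  | cons x xs ih =>
      by_cases hp : p x
      · rw [List.filter_cons_of_pos hp, PySem.Set.ofList_cons, PySem.Set.ofList_cons, ih,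
          List.filter_cons_of_pos hp]
        simp only [PySem.Set.discard, List.filter_filter]
        congr 1
        apply List.filter_congr
        intro a _
        rw [Bool.and_comm]
      · rw [List.filter_cons_of_neg (by simpa using hp), PySem.Set.ofList_cons, ih,
          List.filter_cons_of_neg (by simpa using hp)]
        simp only [PySem.Set.discard, List.filter_filter]
        apply List.filter_congr
        intro a _
        by_cases ha : p a
        · have : a ≠ x := fun h => by subst h; exact hp ha
          simp [ha, this]
        · simp [ha]

-- counts of values ≠ x survive filtering out x
theorem count_filter_ne (xs : List Int) (x a : Int) (h : a ≠ x) :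
    (xs.filter (fun y => y ≠ x)).count a = xs.count a := by
  exact List.count_filter (by simp [h])

-- A's side: the double counting loop is the counter of the flattened deduped list
theorem repeat_sum_eq_spec (l : List (List Int)) :
    repeat_sum l = rsSpec (l.flatMap (fun arr => PySem.Set.ofList arr)) := by
  simp only [repeat_sum, rsSpec]
  have hc : l.foldl (fun d arr =>
      (PySem.Set.ofList arr).foldl (fun d num => d.modify num 0 (· + 1)) d)
      PySem.Dict.empty
      = PySem.Dict.counter (l.flatMap (fun arr => PySem.Set.ofList arr)) := by
    rw [PySem.Dict.counter_eq_foldl, List.foldl_flatMap]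
  rw [hc, PySem.Dict.items_counter, foldl_if_sum, zero_add, List.filter_map, List.map_map]
  have hmap : ((fun kv : Int × Int => kv.1) ∘ fun k : Int => (k, ((l.flatMap (fun arr => PySem.Set.ofList arr)).count k : Int))) = id := rfl
  rw [hmap, List.map_id]
  congr 1
  apply List.filter_congr
  intro a _
  simp only [Function.comp_apply, decide_eq_decide]
  omega

-- B's side: the partition loop computes the same sum
-- length bookkeeping: removing all copies of x drops exactly count x elements
theorem length_filter_ne (xs : List Int) (x : Int) :
    (xs.filter (fun y => y ≠ x)).length + xs.count x = xs.length := by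
  induction xs with
  | nil => simp
  | cons a xs ih =>
      by_cases ha : a = x
      · subst ha; simp [← ih]; omega
      · simp [ha, ← ih]; omega

theorem discard_eq_filter (s : List Int) (x : Int) :
    PySem.Set.discard s x = s.filter (fun y => y ≠ x) := by
  simp only [PySem.Set.discard]
  exact List.filter_congr (fun a _ => by by_cases h : a = x <;> simp [h])

theorem rsSpec_cons (head : Int) (tl : List Int) :
    rsSpec (head :: tl)
      = (if 2 ≤ (head :: tl).count head then head else 0)
        + rsSpec ((head :: tl).filter (fun y => y ≠ head)) := by
  have hrest : PySem.Set.ofList ((head :: tl).filter (fun y => y ≠ head))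
      = (PySem.Set.ofList tl).filter (fun y => y ≠ head) := by
    rw [ofList_filter, PySem.Set.ofList_cons, discard_eq_filter,
      List.filter_cons_of_neg (by simp), List.filter_filter]
    exact List.filter_congr (fun a _ => by by_cases h : a = head <;> simp [h])
  unfold rsSpec
  rw [hrest, PySem.Set.ofList_cons, discard_eq_filter, List.filter_cons]
  have hq : ∀ a ∈ (PySem.Set.ofList tl).filter (fun y => y ≠ head),
      decide (2 ≤ ((head :: tl).filter (fun y => y ≠ head)).count a)
        = decide (2 ≤ (head :: tl).count a) := by
    intro a ha
    have hne : a ≠ head := by simpa using (List.mem_filter.mp ha).2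
    rw [count_filter_ne _ _ _ hne]
  rw [List.filter_congr hq]
  by_cases h2 : 2 ≤ (head :: tl).count head
  · rw [if_pos (by simpa using h2), if_pos h2, List.sum_cons]
  · rw [if_neg (by simpa using h2), if_neg h2, zero_add]

theorem rsLoop_eq_spec (xs : List Int) (t : Int) : rsLoop xs t = t + rsSpec xs := by
  generalize hn : xs.length = n
  induction n using Nat.strong_induction_on generalizing xs t with
  | _ n ih =>
    cases xs with
    | nil => simp [rsLoop, rsSpec]
    | cons head tl =>
        rw [rsLoop]
        have hl : ((head :: tl).filter (fun y => y ≠ head)).length < (head :: tl).length := by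
          simp only [List.filter_cons, ne_eq, not_true_eq_false, decide_false, List.length_cons]
          exact Nat.lt_succ_of_le (List.length_filter_le _ _)
        rw [ih _ (hn ▸ hl) _ _ rfl, rsSpec_cons]
        have hlen := length_filter_ne (head :: tl) head
        by_cases h2 : 2 ≤ (head :: tl).count head
        · rw [if_pos h2, if_pos (by omega)]; ring
        · rw [if_neg h2, if_neg (by omega)]; ring

-- ===== VERDICT (by name: the statement is the Claim_ definition above) =====
theorem repeat_sum_spec : Claim_equal_repeat_sum := by
  intro l _
  unfold Spec_repeat_sum repeat_sum_alt
  rw [repeat_sum_eq_spec, rsLoop_eq_spec, zero_add]
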